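-- pv_equiv track=rewrite | github.com/2024frank/AI-Microgrant-Research-Oberlin | scripts/normalize_oberlin_localist_events.py | _sessions_overlap
-- ===== SOURCE A (Python) =====
-- def _sessions_overlap(sessions_a: list[dict], sessions_b: list[dict]) -> bool:
--     for sa in sessions_a:
--         for sb in sessions_b:
--             a_start = sa.get("startTime") or sa.get("start")
--             a_end = sa.get("endTime") or sa.get("end")
--             b_start = sb.get("startTime") or sb.get("start")
--             b_end = sb.get("endTime") or sb.get("end")
--             if a_start and b_start:
--                 if a_start == b_start:
--                     return True
--                 if a_end and b_end and a_start <= b_end and b_start <= a_end: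
--                     return True
--     return False
-- ===== SOURCE B (Python) =====
-- def _sessions_overlap(sessions_a: list[dict], sessions_b: list[dict]) -> bool:
--     def _times(sessions):
--         pairs = []
--         for s in sessions:
--             start = s.get("startTime") or s.get("start")
--             end = s.get("endTime") or s.get("end")
--             if start:
--                 pairs.append((start, end))
--         return pairs
--
--     ta = _times(sessions_a)
--     tb = _times(sessions_b)
--     # Any shared start time?  (hash-set intersection, O(n + m))
--     if not {p[0] for p in ta}.isdisjoint({p[0] for p in tb}):
--         return True
--     # Interval intersection by sort + sweep: walk the a-intervals in order of
--     # increasing end; 'best' is the largest b-end among b-intervals whose start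
--     # is <= the current a-end, maintained with a single advancing pointer.
--     ia = sorted((p for p in ta if p[1]), key=lambda p: p[1])
--     ib = sorted((p for p in tb if p[1]), key=lambda p: p[0])
--     j = 0
--     best = None
--     for s_a, e_a in ia:
--         while j < len(ib) and ib[j][0] <= e_a:
--             if best is None or ib[j][1] > best:
--                 best = ib[j][1]
--             j += 1
--         if best is not None and s_a <= best:
--             return True
--     return False
-- ===== Notes on version B (the rewrite author's own statement) =====
-- stated objective: faster
-- what changed: A's nested all-pairs scan is replaced by a hash-set intersection of start times plus a sort-and-sweep (two-pointer with running max end) interval-intersection test.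
import Mathlib
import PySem

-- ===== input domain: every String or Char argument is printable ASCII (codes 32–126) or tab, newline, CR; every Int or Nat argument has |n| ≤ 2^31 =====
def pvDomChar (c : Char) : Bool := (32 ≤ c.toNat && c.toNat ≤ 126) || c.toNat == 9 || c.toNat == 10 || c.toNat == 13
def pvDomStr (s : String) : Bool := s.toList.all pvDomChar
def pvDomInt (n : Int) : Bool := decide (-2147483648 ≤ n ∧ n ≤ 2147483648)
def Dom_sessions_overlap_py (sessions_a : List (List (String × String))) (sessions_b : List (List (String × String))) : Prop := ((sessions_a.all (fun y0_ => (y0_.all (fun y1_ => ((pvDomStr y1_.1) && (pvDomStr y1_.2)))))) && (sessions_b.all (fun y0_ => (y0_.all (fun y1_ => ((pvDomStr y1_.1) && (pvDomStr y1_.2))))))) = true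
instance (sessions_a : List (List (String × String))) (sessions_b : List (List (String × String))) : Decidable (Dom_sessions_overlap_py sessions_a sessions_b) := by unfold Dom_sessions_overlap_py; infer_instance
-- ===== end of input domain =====

-- B replaces A's all-pairs nested scan by a set intersection of start times plus a
-- sort-and-sweep interval-intersection test; same return value on every input.

-- shared helpers: both Pythons read the times with the same expression
-- 'd.get("startTime") or d.get("start")' (Python truthiness: None and "" are falsy)
def pyTruthy (o : Option String) : Bool :=
  match o with
  | some s => s != ""
  | none => false

def pyOr (a b : Option String) : Option String := if pyTruthy a then a else b

def startOf (s : List (String × String)) : Option String :=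
  pyOr (PySem.Dict.get? (PySem.Dict.ofList s) "startTime") (PySem.Dict.get? (PySem.Dict.ofList s) "start")

def endOf (s : List (String × String)) : Option String :=
  pyOr (PySem.Dict.get? (PySem.Dict.ofList s) "endTime") (PySem.Dict.get? (PySem.Dict.ofList s) "end")

-- ===== PORT A =====
-- body of A's inner loop
def sessPred (sa sb : List (String × String)) : Bool :=
  let a_start := startOf sa
  let a_end := endOf sa
  let b_start := startOf sb
  let b_end := endOf sb
  if pyTruthy a_start && pyTruthy b_start then
    if a_start == b_start then true
    else if pyTruthy a_end && pyTruthy b_end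
            && decide (a_start.getD "" ≤ b_end.getD "") && decide (b_start.getD "" ≤ a_end.getD "") then true
    else false
  else false

def sessions_overlap_py (sessions_a : List (List (String × String))) (sessions_b : List (List (String × String))) : Bool :=
  sessions_a.any (fun sa => sessions_b.any (fun sb => sessPred sa sb))

-- ===== PORT B =====
-- B's _times: the (start, end) pairs of the sessions with a truthy start
def timesOf (sessions : List (List (String × String))) : List (Option String × Option String) :=
  sessions.foldl (fun pairs s => if pyTruthy (startOf s) then pairs ++ [(startOf s, endOf s)] else pairs) []

-- 'if best is None or e > best: best = e'
def bmax (best : Option String) (e : String) : Option String :=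
  match best with
  | none => some e
  | some b => if b < e then some e else some b

-- B's inner while loop: consume the b-intervals whose start is ≤ eA, folding their ends into best
def advance (eA : String) : List (Option String × Option String) → Option String → List (Option String × Option String) × Option String
  | [], best => ([], best)
  | q :: rest, best =>
      if q.1.getD "" ≤ eA then advance eA rest (bmax best (q.2.getD ""))
      else (q :: rest, best)

-- B's outer for loop over the a-intervals (the suffix of ib stands for the pointer j)
def sweep : List (Option String × Option String) → List (Option String × Option String) → Option String → Bool
  | [], _, _ => false
  | p :: rest, ib, best =>
      let r := advance (p.2.getD "") ib best
      match r.2 with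
      | some b => if p.1.getD "" ≤ b then true else sweep rest r.1 r.2
      | none => sweep rest r.1 r.2

def sessions_overlap_py_alt (sessions_a : List (List (String × String))) (sessions_b : List (List (String × String))) : Bool :=
  let ta := timesOf sessions_a
  let tb := timesOf sessions_b
  if !(PySem.Set.isdisjoint (PySem.Set.ofList (ta.map (·.1))) (PySem.Set.ofList (tb.map (·.1)))) then true
  else
    let ia := PySem.List.sorted (ta.filter (fun p => pyTruthy p.2)) (fun p => p.2.getD "") false
    let ib := PySem.List.sorted (tb.filter (fun p => pyTruthy p.2)) (fun p => p.1.getD "") false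
    sweep ia ib none

-- ===== PRECONDITION & SPEC =====
def Spec_sessions_overlap_py (sessions_a : List (List (String × String))) (sessions_b : List (List (String × String))) (out : Bool) : Prop := out = sessions_overlap_py_alt sessions_a sessions_b
instance (sessions_a : List (List (String × String))) (sessions_b : List (List (String × String))) (out : Bool) : Decidable (Spec_sessions_overlap_py sessions_a sessions_b out) := by unfold Spec_sessions_overlap_py; infer_instance

-- ===== CLAIM (what is proved, stated in full; the proofs are below) =====
def Claim_equal_sessions_overlap_py : Prop := ∀ (sessions_a : List (List (String × String))) (sessions_b : List (List (String × String))), Dom_sessions_overlap_py sessions_a sessions_b → Spec_sessions_overlap_py sessions_a sessions_b (sessions_overlap_py sessions_a sessions_b)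

-- ===== LEMMAS AND PROOFS =====

def StartHit (a b : List (String × String)) : Prop :=
  pyTruthy (startOf a) = true ∧ pyTruthy (startOf b) = true ∧ startOf a = startOf b

def RangeHit (a b : List (String × String)) : Prop :=
  pyTruthy (startOf a) = true ∧ pyTruthy (startOf b) = true ∧
  pyTruthy (endOf a) = true ∧ pyTruthy (endOf b) = true ∧
  (startOf a).getD "" ≤ (endOf b).getD "" ∧ (startOf b).getD "" ≤ (endOf a).getD ""

lemma sessPred_iff (a b : List (String × String)) :
    sessPred a b = true ↔ StartHit a b ∨ RangeHit a b := by
  unfold sessPred StartHit RangeHit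
  simp only []
  split_ifs with h1 h2 h3 <;> simp_all

lemma portA_iff (A B : List (List (String × String))) :
    sessions_overlap_py A B = true ↔ ∃ a ∈ A, ∃ b ∈ B, StartHit a b ∨ RangeHit a b := by
  simp [sessions_overlap_py, sessPred_iff]

lemma timesOf_eq (l : List (List (String × String))) :
    timesOf l = (l.filter (fun s => pyTruthy (startOf s))).map (fun s => (startOf s, endOf s)) := by
  rw [timesOf, PySem.List.foldl_append_if (p := fun s => pyTruthy (startOf s)) (f := fun s => (startOf s, endOf s))]
  simp

lemma mem_timesOf (l : List (List (String × String))) (p : Option String × Option String) :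
    p ∈ timesOf l ↔ ∃ s ∈ l, pyTruthy (startOf s) = true ∧ p = (startOf s, endOf s) := by
  simp [timesOf_eq]
  aesop

def foldBest (best : Option String) (l : List String) : Option String := l.foldl bmax best

lemma foldBest_cons (best : Option String) (e : String) (l : List String) :
    foldBest best (e :: l) = foldBest (bmax best e) l := rfl

lemma bmax_spec (best : Option String) (e : String) :
    ∃ m, bmax best e = some m ∧ e ≤ m ∧ (∀ b, best = some b → b ≤ m) ∧ (m = e ∨ best = some m) := by
  cases best with
  | none => exact ⟨e, rfl, le_refl e, by simp, Or.inl rfl⟩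
  | some b =>
    by_cases h : b < e
    · exact ⟨e, by simp [bmax, h], le_refl e,
        fun b' hb' => le_of_lt (Option.some_injective _ hb' ▸ h), Or.inl rfl⟩
    · exact ⟨b, by simp [bmax, h], le_of_not_gt h, by simp, Or.inr rfl⟩

lemma foldBest_isSome (l : List String) (best : Option String) (h : best.isSome ∨ l ≠ []) :
    (foldBest best l).isSome := by
  induction l generalizing best with
  | nil =>
    rcases h with h | h
    · simpa [foldBest] using h
    · simp at h
  | cons e t ih =>
    rw [foldBest_cons]
    apply ih
    left
    obtain ⟨m, hm, -⟩ := bmax_spec best e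
    simp [hm]

lemma foldBest_ub (l : List String) (best : Option String) (m : String) (h : foldBest best l = some m) :
    (∀ e ∈ l, e ≤ m) ∧ (∀ b, best = some b → b ≤ m) := by
  induction l generalizing best with
  | nil =>
    simp only [foldBest, List.foldl_nil] at h
    exact ⟨by simp, fun b hb => le_of_eq (by rw [hb] at h; exact Option.some_injective _ h)⟩
  | cons e t ih =>
    rw [foldBest_cons] at h
    obtain ⟨ht, hb'⟩ := ih (bmax best e) h
    obtain ⟨m₀, hm₀, he, hbest, -⟩ := bmax_spec best e
    have hm₀m : m₀ ≤ m := hb' m₀ hm₀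
    refine ⟨?_, fun b hb => le_trans (hbest b hb) hm₀m⟩
    intro x hx
    rcases List.mem_cons.mp hx with rfl | hx
    · exact le_trans he hm₀m
    · exact ht x hx

lemma foldBest_mem (l : List String) (best : Option String) (m : String) (h : foldBest best l = some m) :
    m ∈ l ∨ best = some m := by
  induction l generalizing best with
  | nil => right; simpa [foldBest] using h
  | cons e t ih =>
    rw [foldBest_cons] at h
    rcases ih (bmax best e) h with hm | hm
    · left; exact List.mem_cons_of_mem _ hm
    · obtain ⟨m₀, hm₀, -, -, halt⟩ := bmax_spec best e
      rw [hm₀] at hm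
      have : m₀ = m := Option.some_injective _ hm
      subst this
      rcases halt with rfl | hb
      · left; exact List.mem_cons_self ..
      · right; exact hb

lemma foldBest_append (best : Option String) (l₁ l₂ : List String) :
    foldBest best (l₁ ++ l₂) = foldBest (foldBest best l₁) l₂ := List.foldl_append ..

lemma takeWhile_eq_filter_of_pairwise {α : Type} (c : α → Bool) (r : List α)
    (h : r.Pairwise (fun x y => c y = true → c x = true)) :
    r.takeWhile c = r.filter c ∧ r.dropWhile c = r.filter (fun x => !c x) := by
  induction r with
  | nil => simp
  | cons a t ih =>
    rw [List.pairwise_cons] at h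
    obtain ⟨ha, ht⟩ := h
    obtain ⟨h1, h2⟩ := ih ht
    by_cases hc : c a = true
    · simp [hc, h1, h2]
    · rw [Bool.not_eq_true] at hc
      have hall : ∀ x ∈ t, c x = false := fun x hx => by
        cases hcx : c x with
        | false => rfl
        | true => exact absurd (ha x hx hcx) (by simp [hc])
      have hfn : List.filter c t = [] := List.filter_eq_nil_iff.mpr (by simpa using hall)
      constructor
      · rw [List.takeWhile_cons, List.filter_cons_of_neg (by simp [hc]), hfn]
        simp [hc]
      · rw [List.dropWhile_cons, List.filter_cons_of_pos (by simp [hc]),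
          List.filter_eq_self.mpr (by intro x hx; simp [hall x hx])]
        simp [hc]

lemma advance_eq (eA : String) (r : List (Option String × Option String)) (best : Option String) :
    advance eA r best = (r.dropWhile (fun q => decide (q.1.getD "" ≤ eA)),
      foldBest best ((r.takeWhile (fun q => decide (q.1.getD "" ≤ eA))).map (fun q => q.2.getD ""))) := by
  induction r generalizing best with
  | nil => simp [advance, foldBest]
  | cons q t ih =>
    by_cases h : q.1.getD "" ≤ eA
    · simp only [advance, h, if_pos, List.dropWhile_cons, List.takeWhile_cons, decide_eq_true_eq]
      rw [ih]
      simp [foldBest_cons]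
    · have hd : decide (q.1.getD "" ≤ eA) = false := decide_eq_false h
      simp only [advance, List.dropWhile_cons, List.takeWhile_cons, hd]
      simp [h, foldBest]

lemma sweep_iff (l r : List (Option String × Option String)) (best : Option String)
    (hl : l.Pairwise (fun p q => p.2.getD "" ≤ q.2.getD ""))
    (hr : r.Pairwise (fun p q => p.1.getD "" ≤ q.1.getD "")) :
    sweep l r best = true ↔
      ∃ p ∈ l, ∃ m, foldBest best ((r.filter (fun q => decide (q.1.getD "" ≤ p.2.getD ""))).map (fun q => q.2.getD "")) = some m ∧ p.1.getD "" ≤ m := by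
  induction l generalizing r best with
  | nil => simp [sweep]
  | cons p rest ih =>
    rw [List.pairwise_cons] at hl
    obtain ⟨hp, hrest⟩ := hl
    have hmono : r.Pairwise (fun x y =>
        (fun q => decide (q.1.getD "" ≤ p.2.getD "")) y = true →
        (fun q => decide (q.1.getD "" ≤ p.2.getD "")) x = true) := by
      refine hr.imp ?_
      intro x y hxy
      simp only [decide_eq_true_eq]
      exact fun hy => le_trans hxy hy
    obtain ⟨htake, hdrop⟩ :=
      takeWhile_eq_filter_of_pairwise (fun q => decide (q.1.getD "" ≤ p.2.getD "")) r hmono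
    have hadv := advance_eq (p.2.getD "") r best
    set B' : Option String :=
      foldBest best ((r.filter (fun q => decide (q.1.getD "" ≤ p.2.getD ""))).map (fun q => q.2.getD "")) with hB'
    have hadv2 : advance (p.2.getD "") r best
        = (r.filter (fun q => !decide (q.1.getD "" ≤ p.2.getD "")), B') := by
      rw [hadv, hdrop, hB', htake]
    have hr' : (r.filter (fun q => !decide (q.1.getD "" ≤ p.2.getD ""))).Pairwise
        (fun p q => p.1.getD "" ≤ q.1.getD "") :=
      List.Pairwise.sublist List.filter_sublist hr
    have hkey : ∀ p' ∈ rest,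
        foldBest B' (((r.filter (fun q => !decide (q.1.getD "" ≤ p.2.getD ""))).filter
            (fun q => decide (q.1.getD "" ≤ p'.2.getD ""))).map (fun q => q.2.getD ""))
        = foldBest best ((r.filter (fun q => decide (q.1.getD "" ≤ p'.2.getD ""))).map (fun q => q.2.getD "")) := by
      intro p' hp'
      have hee : p.2.getD "" ≤ p'.2.getD "" := hp p' hp'
      have hsplit : r = r.filter (fun q => decide (q.1.getD "" ≤ p.2.getD ""))
          ++ r.filter (fun q => !decide (q.1.getD "" ≤ p.2.getD "")) := by
        rw [← htake, ← hdrop, List.takeWhile_append_dropWhile]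
      have h1 : (r.filter (fun q => decide (q.1.getD "" ≤ p.2.getD ""))).filter
          (fun q => decide (q.1.getD "" ≤ p'.2.getD "")) =
          r.filter (fun q => decide (q.1.getD "" ≤ p.2.getD "")) := by
        apply List.filter_eq_self.mpr
        intro q hq
        have hq' := List.of_mem_filter hq
        simp only [decide_eq_true_eq] at hq' ⊢
        exact le_trans hq' hee
      conv_rhs => rw [hsplit]
      rw [List.filter_append, h1, List.map_append, foldBest_append, ← hB']
    have hrestiff : sweep rest (r.filter (fun q => !decide (q.1.getD "" ≤ p.2.getD ""))) B' = true ↔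
        ∃ p' ∈ rest, ∃ m, foldBest best ((r.filter (fun q => decide (q.1.getD "" ≤ p'.2.getD ""))).map (fun q => q.2.getD "")) = some m ∧ p'.1.getD "" ≤ m := by
      rw [ih _ B' hrest hr']
      constructor
      · rintro ⟨p', hp', m, hm, hle⟩
        exact ⟨p', hp', m, by rw [← hkey p' hp']; exact hm, hle⟩
      · rintro ⟨p', hp', m, hm, hle⟩
        exact ⟨p', hp', m, by rw [hkey p' hp']; exact hm, hle⟩
    rw [List.exists_mem_cons_iff]
    cases hB : B' with
    | none =>
      have hone : advance (p.2.getD "") r best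
          = (r.filter (fun q => !decide (q.1.getD "" ≤ p.2.getD "")), none) := by rw [hadv2, hB]
      have hstep : sweep (p :: rest) r best
          = sweep rest (r.filter (fun q => !decide (q.1.getD "" ≤ p.2.getD ""))) none := by
        simp only [sweep, hone]
      rw [hB] at hrestiff
      rw [hstep, hrestiff, ← hB', hB]
      simp
    | some b =>
      have hone : advance (p.2.getD "") r best
          = (r.filter (fun q => !decide (q.1.getD "" ≤ p.2.getD "")), some b) := by rw [hadv2, hB]
      rw [hB] at hrestiff
      rw [← hB', hB]
      by_cases hle : p.1.getD "" ≤ b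
      · have hstep : sweep (p :: rest) r best = true := by
          simp only [sweep, hone]
          rw [if_pos hle]
        rw [hstep]
        exact iff_of_true rfl (Or.inl ⟨b, rfl, hle⟩)
      · have hstep : sweep (p :: rest) r best
            = sweep rest (r.filter (fun q => !decide (q.1.getD "" ≤ p.2.getD ""))) (some b) := by
          simp only [sweep, hone]
          rw [if_neg hle]
        rw [hstep, hrestiff]
        constructor
        · exact Or.inr
        · rintro (⟨m, hm, hlem⟩ | h)
          · exact absurd (Option.some_injective _ hm ▸ hlem) hle
          · exact h

lemma clause_iff (p : Option String × Option String) (r : List (Option String × Option String)) :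
    (∃ m, foldBest none ((r.filter (fun q => decide (q.1.getD "" ≤ p.2.getD ""))).map (fun q => q.2.getD "")) = some m ∧ p.1.getD "" ≤ m)
    ↔ ∃ q ∈ r, q.1.getD "" ≤ p.2.getD "" ∧ p.1.getD "" ≤ q.2.getD "" := by
  constructor
  · rintro ⟨m, hm, hle⟩
    rcases foldBest_mem _ _ _ hm with hmem | hnone
    · obtain ⟨q, hq, rfl⟩ := List.mem_map.mp hmem
      have hq1 := List.of_mem_filter hq
      simp only [decide_eq_true_eq] at hq1
      exact ⟨q, List.mem_of_mem_filter hq, hq1, hle⟩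
    · cases hnone
  · rintro ⟨q, hq, h1, h2⟩
    have hqf : q ∈ r.filter (fun q => decide (q.1.getD "" ≤ p.2.getD "")) :=
      List.mem_filter.mpr ⟨hq, by simp only [decide_eq_true_eq]; exact h1⟩
    have hne : ((r.filter (fun q => decide (q.1.getD "" ≤ p.2.getD ""))).map (fun q => q.2.getD "")) ≠ [] :=
      List.ne_nil_of_mem (List.mem_map_of_mem hqf)
    obtain ⟨m, hm⟩ := Option.isSome_iff_exists.mp (foldBest_isSome _ none (Or.inr hne))
    have hub := (foldBest_ub _ _ _ hm).1 _ (List.mem_map_of_mem hqf)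
    exact ⟨m, hm, le_trans h2 hub⟩

lemma share_iff (A B : List (List (String × String))) :
    (¬ (PySem.Set.isdisjoint (PySem.Set.ofList ((timesOf A).map (·.1))) (PySem.Set.ofList ((timesOf B).map (·.1))) = true))
    ↔ ∃ a ∈ A, ∃ b ∈ B, StartHit a b := by
  rw [PySem.Set.isdisjoint_iff]
  push_neg
  constructor
  · rintro ⟨x, hxA, hxB⟩
    rw [PySem.Set.mem_ofList] at hxA hxB
    obtain ⟨p, hp, hpx⟩ := List.mem_map.mp hxA
    obtain ⟨q, hq, hqx⟩ := List.mem_map.mp hxB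
    obtain ⟨a, ha, hta, rfl⟩ := (mem_timesOf _ _).mp hp
    obtain ⟨b, hb, htb, rfl⟩ := (mem_timesOf _ _).mp hq
    exact ⟨a, ha, b, hb, hta, htb, by simp only at hpx hqx; rw [hpx, hqx]⟩
  · rintro ⟨a, ha, b, hb, hta, htb, heq⟩
    refine ⟨startOf a, ?_, ?_⟩
    · rw [PySem.Set.mem_ofList]
      exact List.mem_map.mpr ⟨(startOf a, endOf a), (mem_timesOf _ _).mpr ⟨a, ha, hta, rfl⟩, rfl⟩
    · rw [PySem.Set.mem_ofList]
      exact List.mem_map.mpr ⟨(startOf b, endOf b), (mem_timesOf _ _).mpr ⟨b, hb, htb, rfl⟩, heq ▸ rfl⟩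

lemma portB_iff (A B : List (List (String × String))) :
    sessions_overlap_py_alt A B = true ↔ ∃ a ∈ A, ∃ b ∈ B, StartHit a b ∨ RangeHit a b := by
  have hdist : (∃ a ∈ A, ∃ b ∈ B, StartHit a b ∨ RangeHit a b) ↔
      (∃ a ∈ A, ∃ b ∈ B, StartHit a b) ∨ (∃ a ∈ A, ∃ b ∈ B, RangeHit a b) := by
    constructor
    · rintro ⟨a, ha, b, hb, h | h⟩
      · exact Or.inl ⟨a, ha, b, hb, h⟩
      · exact Or.inr ⟨a, ha, b, hb, h⟩
    · rintro (⟨a, ha, b, hb, h⟩ | ⟨a, ha, b, hb, h⟩)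
      · exact ⟨a, ha, b, hb, Or.inl h⟩
      · exact ⟨a, ha, b, hb, Or.inr h⟩
  rw [hdist]
  by_cases hd : PySem.Set.isdisjoint (PySem.Set.ofList ((timesOf A).map (·.1)))
      (PySem.Set.ofList ((timesOf B).map (·.1))) = true
  · have hLHS : sessions_overlap_py_alt A B =
        sweep (PySem.List.sorted ((timesOf A).filter (fun p => pyTruthy p.2)) (fun p => p.2.getD "") false)
              (PySem.List.sorted ((timesOf B).filter (fun p => pyTruthy p.2)) (fun p => p.1.getD "") false) none := by
      simp only [sessions_overlap_py_alt, hd, Bool.not_true, Bool.false_eq_true, if_false]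
    have hnoshare : ¬ ∃ a ∈ A, ∃ b ∈ B, StartHit a b := fun h => (share_iff A B).mpr h hd
    rw [hLHS, sweep_iff _ _ _ (PySem.List.sorted_pairwise _ _) (PySem.List.sorted_pairwise _ _)]
    constructor
    · rintro ⟨p, hpmem, hcl⟩
      rw [clause_iff] at hcl
      obtain ⟨q, hqmem, h1, h2⟩ := hcl
      rw [PySem.List.mem_sorted] at hpmem hqmem
      obtain ⟨hpta, hpt⟩ := List.mem_filter.mp hpmem
      obtain ⟨hqtb, hqt⟩ := List.mem_filter.mp hqmem
      obtain ⟨a, ha, hsa, rfl⟩ := (mem_timesOf _ _).mp hpta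
      obtain ⟨b, hb, hsb, rfl⟩ := (mem_timesOf _ _).mp hqtb
      exact Or.inr ⟨a, ha, b, hb, hsa, hsb, hpt, hqt, h2, h1⟩
    · rintro (hS | ⟨a, ha, b, hb, hsa, hsb, hea, heb, hab, hba⟩)
      · exact absurd hS hnoshare
      · refine ⟨(startOf a, endOf a), ?_, ?_⟩
        · rw [PySem.List.mem_sorted]
          exact List.mem_filter.mpr ⟨(mem_timesOf _ _).mpr ⟨a, ha, hsa, rfl⟩, hea⟩
        · rw [clause_iff]
          refine ⟨(startOf b, endOf b), ?_, hba, hab⟩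
          rw [PySem.List.mem_sorted]
          exact List.mem_filter.mpr ⟨(mem_timesOf _ _).mpr ⟨b, hb, hsb, rfl⟩, heb⟩
  · have hdf : PySem.Set.isdisjoint (PySem.Set.ofList ((timesOf A).map (·.1)))
        (PySem.Set.ofList ((timesOf B).map (·.1))) = false := eq_false_of_ne_true hd
    have hLHS : sessions_overlap_py_alt A B = true := by
      simp only [sessions_overlap_py_alt, hdf, Bool.not_false, if_true]
    rw [hLHS]
    exact iff_of_true rfl (Or.inl ((share_iff A B).mp hd))

-- ===== VERDICT (by name: the statement is the Claim_ definition above) =====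
theorem sessions_overlap_py_spec : Claim_equal_sessions_overlap_py := by
  intro A B _
  unfold Spec_sessions_overlap_py
  exact Bool.eq_iff_iff.mpr ((portA_iff A B).trans (portB_iff A B).symm)
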